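-- pv_equiv track=rewrite | github.com/in-imitable/Python | texttoaudio.py | onehop
-- ===== SOURCE A (Python) =====
-- def onehop(list):
--     new = []
--     for i in range(len(list)):
--         for j in range(len(list)):
--             if i != j and list[i][1] == list[j][0]:
--                 q = list[i][0]
--                 w = list[j][1]
--                 if q != w:
--                     t = (q, w)
--                     if t not in new:
--                         new.append(tuple(t))
--     new.sort()
--     return (new)
-- ===== SOURCE B (Python) =====
-- def onehop(list):
--     # Index edge targets by their start value, then collect composed pairs into a set.
--     index = {}
--     for c, d in list:
--         index.setdefault(c, []).append(d)
--     pairs = set()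
--     for a, b in list:
--         for d in index.get(b, ()):
--             if a != d:
--                 pairs.add((a, d))
--     return sorted(pairs)
-- ===== Notes on version B (the rewrite author's own statement) =====
-- stated objective: faster
-- what changed: Replaces A's quadratic index-pair scan with a linear membership test of the output list (O(n^2) iterations each scanning 'new') by a dict indexing edge ends by start value, a set collecting composed pairs, and one final sort.
import Mathlib
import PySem

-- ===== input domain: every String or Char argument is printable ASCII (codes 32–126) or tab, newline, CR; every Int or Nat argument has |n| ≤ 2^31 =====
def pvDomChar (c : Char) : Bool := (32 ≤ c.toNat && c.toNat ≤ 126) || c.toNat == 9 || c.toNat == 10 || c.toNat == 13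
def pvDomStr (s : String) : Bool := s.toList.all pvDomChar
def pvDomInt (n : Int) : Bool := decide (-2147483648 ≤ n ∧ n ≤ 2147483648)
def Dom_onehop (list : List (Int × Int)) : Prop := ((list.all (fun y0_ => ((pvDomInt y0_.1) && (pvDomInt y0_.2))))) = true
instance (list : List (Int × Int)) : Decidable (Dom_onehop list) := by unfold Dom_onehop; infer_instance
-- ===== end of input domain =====

-- B replaces A's quadruply-nested index scans by a dict index on edge starts plus a set of
-- composed pairs (objective: faster, asymptotic — no inner membership scan of the output list).

-- ===== PORT A =====
-- 'if t not in new: new.append(t)' is the first-occurrence dedup append = PySem.Set.add;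
-- indices from range(len(list)) are always in range, so list[i] is the total pyGetD.
def onehop (list : List (Int × Int)) : List (Int × Int) :=
  let new : List (Int × Int) :=
    (PySem.List.pyRange 0 list.length 1).foldl (fun new i =>
      (PySem.List.pyRange 0 list.length 1).foldl (fun new j =>
        if i ≠ j ∧ (PySem.List.pyGetD list i (0, 0)).2 = (PySem.List.pyGetD list j (0, 0)).1 then
          let q := (PySem.List.pyGetD list i (0, 0)).1
          let w := (PySem.List.pyGetD list j (0, 0)).2
          if q ≠ w then PySem.Set.add new (q, w) else new
        else new) new) []
  PySem.List.sorted2 new Prod.fst Prod.snd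

-- ===== PORT B =====
-- index.setdefault(c, []).append(d) is Dict.modify c [] (· ++ [d]); pairs is a PySem.Set.
def onehop_alt (list : List (Int × Int)) : List (Int × Int) :=
  let index : PySem.Dict Int (List Int) :=
    list.foldl (fun d p => d.modify p.1 [] (fun v => v ++ [p.2])) PySem.Dict.empty
  let pairs : PySem.Set (Int × Int) :=
    list.foldl (fun s p =>
      (index.getD p.2 []).foldl (fun s d =>
        if p.1 ≠ d then PySem.Set.add s (p.1, d) else s) s) PySem.Set.empty
  PySem.List.sorted2 pairs Prod.fst Prod.snd

-- ===== PRECONDITION & SPEC =====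
def Spec_onehop (list : List (Int × Int)) (out : List (Int × Int)) : Prop := out = onehop_alt list
instance (list : List (Int × Int)) (out : List (Int × Int)) : Decidable (Spec_onehop list out) := by unfold Spec_onehop; infer_instance

-- ===== CLAIM (what is proved, stated in full; the proofs are below) =====
def Claim_equal_onehop : Prop := ∀ (list : List (Int × Int)), Dom_onehop list → Spec_onehop list (onehop list)

-- ===== LEMMAS AND PROOFS =====

-- a guarded add-loop is the add-fold of the filterMapped stream
theorem pv_foldl_add_ite {α β : Type} [BEq β] (c : α → Prop) [DecidablePred c] (f : α → β)
    (l : List α) (s : List β) :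
    l.foldl (fun s x => if c x then PySem.Set.add s (f x) else s) s
      = (l.filterMap (fun x => if c x then some (f x) else none)).foldl PySem.Set.add s := by
  induction l generalizing s with
  | nil => rfl
  | cons x t ih =>
    simp only [List.foldl_cons, List.filterMap_cons]
    split_ifs <;> simp [ih]

-- a nested add-loop is the add-fold of the flatMapped stream
theorem pv_foldl_foldl_add {α γ : Type} [BEq γ] (outer : List α) (inner : α → List γ)
    (s : List γ) :
    outer.foldl (fun s i => (inner i).foldl PySem.Set.add s) s
      = (outer.flatMap inner).foldl PySem.Set.add s := by
  induction outer generalizing s with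
  | nil => rfl
  | cons x t ih => simp [List.foldl_append, ih]

theorem pv_foldl_congr {α β : Type} (l : List α) (f g : β → α → β) (s : β)
    (h : ∀ s x, f s x = g s x) : l.foldl f s = l.foldl g s := by
  have : f = g := funext fun s => funext fun x => h s x
  rw [this]

theorem pv_flatMap_congr {α β : Type} {f g : α → List β} (l : List α)
    (h : ∀ x, f x = g x) : l.flatMap f = l.flatMap g := by
  rw [funext h]

theorem pv_pyRange_len (n : Nat) :
    PySem.List.pyRange 0 (n : Int) 1 = (List.range n).map (fun k : Nat => (k : Int)) := by
  rcases Nat.eq_zero_or_pos n with h | h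
  · subst h; rfl
  · simp [PySem.List.pyRange]
    rw [if_pos h]

-- an index loop over range(len(xs)) reading xs[j] is a loop over xs itself
theorem pv_filterMap_range_getD {α β : Type} (xs : List α) (d : α) (F : α → Option β) :
    (List.range xs.length).filterMap (fun j => F (xs.getD j d)) = xs.filterMap F := by
  induction xs with
  | nil => rfl
  | cons x t ih =>
    simp only [List.length_cons, List.range_succ_eq_map, List.filterMap_cons,
      List.filterMap_map]
    cases h : F x <;> simp_all

theorem pv_flatMap_range_getD {α β : Type} (xs : List α) (d : α) (F : α → List β) :
    (List.range xs.length).flatMap (fun j => F (xs.getD j d)) = xs.flatMap F := by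
  induction xs with
  | nil => rfl
  | cons x t ih =>
    simp only [List.length_cons, List.range_succ_eq_map, List.flatMap_cons, List.flatMap_map]
    simp_all

-- the composed-pair stream both programs deduplicate (in the same first-occurrence order)
def pvStream (list : List (Int × Int)) : List (Int × Int) :=
  list.flatMap (fun p =>
    list.filterMap (fun x => if x.1 = p.2 ∧ p.1 ≠ x.2 then some (p.1, x.2) else none))

theorem pv_onehop_eq (list : List (Int × Int)) :
    onehop list = PySem.List.sorted2 ((pvStream list).foldl PySem.Set.add []) Prod.fst Prod.snd := by
  simp only [onehop]
  apply congrArg (fun l => PySem.List.sorted2 l Prod.fst Prod.snd)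
  have hbody : ∀ (i : Int) (new : List (Int × Int)),
      (PySem.List.pyRange 0 list.length 1).foldl (fun new j =>
        if i ≠ j ∧ (PySem.List.pyGetD list i (0, 0)).2 = (PySem.List.pyGetD list j (0, 0)).1 then
          if (PySem.List.pyGetD list i (0, 0)).1 ≠ (PySem.List.pyGetD list j (0, 0)).2 then
            PySem.Set.add new ((PySem.List.pyGetD list i (0, 0)).1, (PySem.List.pyGetD list j (0, 0)).2)
          else new
        else new) new
      = ((PySem.List.pyRange 0 list.length 1).filterMap (fun j =>
          if (i ≠ j ∧ (PySem.List.pyGetD list i (0, 0)).2 = (PySem.List.pyGetD list j (0, 0)).1) ∧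
              (PySem.List.pyGetD list i (0, 0)).1 ≠ (PySem.List.pyGetD list j (0, 0)).2 then
            some ((PySem.List.pyGetD list i (0, 0)).1, (PySem.List.pyGetD list j (0, 0)).2)
          else none)).foldl PySem.Set.add new := by
    intro i new
    rw [← pv_foldl_add_ite]
    apply pv_foldl_congr
    intro s j
    split_ifs <;> first | rfl | tauto
  refine (pv_foldl_congr _ _ _ _ (fun s i => hbody i s)).trans ?_
  refine (pv_foldl_foldl_add _ _ _).trans ?_
  apply congrArg (fun l => List.foldl PySem.Set.add ([] : List (Int × Int)) l)
  rw [pv_pyRange_len, List.flatMap_map]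
  have hinner : ∀ i : Nat,
      ((List.range list.length).map (fun k : Nat => (k : Int))).filterMap (fun j =>
        if ((i : Int) ≠ j ∧ (PySem.List.pyGetD list (i : Int) (0, 0)).2 = (PySem.List.pyGetD list j (0, 0)).1) ∧
            (PySem.List.pyGetD list (i : Int) (0, 0)).1 ≠ (PySem.List.pyGetD list j (0, 0)).2 then
          some ((PySem.List.pyGetD list (i : Int) (0, 0)).1, (PySem.List.pyGetD list j (0, 0)).2)
        else none)
      = list.filterMap (fun x =>
          if x.1 = (list.getD i (0, 0)).2 ∧ (list.getD i (0, 0)).1 ≠ x.2 then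
            some ((list.getD i (0, 0)).1, x.2) else none) := by
    intro i
    rw [List.filterMap_map]
    refine (List.filterMap_congr (fun j _ => ?_)).trans (pv_filterMap_range_getD list (0, 0) _)
    simp only [Function.comp_def, PySem.List.pyGetD_natCast]
    by_cases hj : j = i
    · subst hj
      rw [if_neg (by omega), if_neg (by omega)]
    · have hne : (i : Int) ≠ (j : Int) := by exact_mod_cast Ne.symm hj
      split_ifs with h1 h2 <;> first | rfl | (exfalso; omega)
  exact (pv_flatMap_congr _ (fun i => hinner i)).trans
    (pv_flatMap_range_getD list (0, 0) (fun p =>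
      list.filterMap (fun x => if x.1 = p.2 ∧ p.1 ≠ x.2 then some (p.1, x.2) else none)))

theorem pv_onehop_alt_eq (list : List (Int × Int)) :
    onehop_alt list = PySem.List.sorted2 ((pvStream list).foldl PySem.Set.add []) Prod.fst Prod.snd := by
  simp only [onehop_alt]
  apply congrArg (fun l => PySem.List.sorted2 l Prod.fst Prod.snd)
  have hidx : ∀ b : Int,
      (list.foldl (fun d p => d.modify p.1 [] (fun v => v ++ [p.2])) PySem.Dict.empty).getD b []
      = (list.filter (fun x => x.1 == b)).map (fun x => x.2) := by
    intro b
    rw [PySem.Dict.getD_foldl_modify_append, PySem.Dict.getD_empty]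
    rfl
  refine (pv_foldl_congr _ _ _ _ (fun s p => ?_)).trans (pv_foldl_foldl_add list _ [])
  rw [hidx p.2, pv_foldl_add_ite (fun d => p.1 ≠ d) (fun d => (p.1, d)),
    List.filterMap_map, List.filterMap_filter]
  apply congrArg (fun l => List.foldl PySem.Set.add s l)
  refine List.filterMap_congr (fun x _ => ?_)
  simp only [Function.comp_def]
  split_ifs <;> simp_all

-- ===== VERDICT (by name: the statement is the Claim_ definition above) =====
theorem onehop_spec : Claim_equal_onehop := by
  intro list _
  show onehop list = onehop_alt list
  rw [pv_onehop_eq, pv_onehop_alt_eq]
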